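-- pv_equiv track=rewrite | github.com/ktawiah/CodePath-DSA | Unit-3/group_by_habbits.py | group_animals_by_habitat
-- ===== SOURCE A (Python) =====
-- def group_animals_by_habitat(habitats):
--     # Step 1: Record the last occurrence of each species
--     last_occurrence = {}
--     for i, species in enumerate(habitats):
--         last_occurrence[species] = i
--
--     # Step 2: Initialize variables for the result and to track the partitioning process
--     result = []
--     start = 0
--     end = 0
--
--     # Step 3: Traverse the string and form groups
--     for i, species in enumerate(habitats):
--         # Update the farthest point we need to reach in the current group
--         end = max(end, last_occurrence[species])
--
--         # If we've reached the farthest point for this group, it forms a valid group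
--         if i == end:
--             result.append(i - start + 1)  # Size of the current group
--             start = i + 1  # Start the next group
--
--     return result
-- ===== SOURCE B (Python) =====
-- def group_animals_by_habitat(habitats):
--     n = len(habitats)
--     cuts = [i for i in range(n) if set(habitats[:i+1]).isdisjoint(habitats[i+1:])]
--     return [c - p for p, c in zip([-1] + cuts, cuts)]
-- ===== Notes on version B (the rewrite author's own statement) =====
-- stated objective: alternative
-- what changed: B replaces A's dict-of-last-occurrences plus stateful running-max greedy scan by a declarative characterisation: an index i ends a group iff the set of species in the prefix is disjoint from the suffix; B lists those cut indices directly and turns consecutive cuts into sizes (O(n^2) slice/set test instead of A's O(n) scan).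
import Mathlib
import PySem

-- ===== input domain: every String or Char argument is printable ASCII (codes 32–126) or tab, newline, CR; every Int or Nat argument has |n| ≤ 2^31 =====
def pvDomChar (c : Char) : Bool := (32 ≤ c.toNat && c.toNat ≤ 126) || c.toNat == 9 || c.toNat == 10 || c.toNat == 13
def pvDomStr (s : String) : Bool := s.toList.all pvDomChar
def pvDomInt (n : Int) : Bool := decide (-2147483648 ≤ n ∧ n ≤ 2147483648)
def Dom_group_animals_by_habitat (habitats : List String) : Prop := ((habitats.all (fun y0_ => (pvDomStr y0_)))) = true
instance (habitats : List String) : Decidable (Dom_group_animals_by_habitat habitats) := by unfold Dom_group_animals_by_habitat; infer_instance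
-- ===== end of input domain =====

-- B replaces A's dict + running-max greedy scan by the declarative cut condition
-- "no species of the prefix reappears in the suffix" (alternative decomposition, not faster).

-- ===== PORT A =====
def group_animals_by_habitat (habitats : List String) : List Int :=
  -- Step 1: last_occurrence[species] = i  (dict built over enumerate)
  let last_occurrence : PySem.Dict String Int :=
    (PySem.List.enumerate habitats 0).foldl (fun d p => d.insert p.2 p.1) PySem.Dict.empty
  -- Step 3: greedy scan; state (result, (start, end)).
  -- last_occurrence[species] never misses (species comes from habitats), so getD is exact here.
  let st :=
    (PySem.List.enumerate habitats 0).foldl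
      (fun (st : List Int × Int × Int) p =>
        let e := max st.2.2 (last_occurrence.getD p.2 0)
        if p.1 == e then (st.1 ++ [p.1 - st.2.1 + 1], (p.1 + 1, e))
        else (st.1, (st.2.1, e)))
      ([], (0, 0))
  st.1

-- ===== PORT B =====
def group_animals_by_habitat_alt (habitats : List String) : List Int :=
  let n : Int := habitats.length
  let cuts : List Int :=
    (PySem.List.pyRange 0 n 1).filter (fun i =>
      PySem.Set.isdisjoint
        (PySem.Set.ofList (PySem.List.slice habitats none (some (i + 1))))
        (PySem.Set.ofList (PySem.List.slice habitats (some (i + 1)) none)))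
  (List.zip ((-1) :: cuts) cuts).map (fun pc => pc.2 - pc.1)

-- ===== PRECONDITION & SPEC =====
def Spec_group_animals_by_habitat (habitats : List String) (out : List Int) : Prop := out = group_animals_by_habitat_alt habitats
instance (habitats : List String) (out : List Int) : Decidable (Spec_group_animals_by_habitat habitats out) := by unfold Spec_group_animals_by_habitat; infer_instance

-- ===== CLAIM (what is proved, stated in full; the proofs are below) =====
def Claim_equal_group_animals_by_habitat : Prop := ∀ (habitats : List String), Dom_group_animals_by_habitat habitats → Spec_group_animals_by_habitat habitats (group_animals_by_habitat habitats)

-- ===== LEMMAS AND PROOFS =====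

-- the last-occurrence dict of A
def pvLastDict (l : List String) : PySem.Dict String Int :=
  (PySem.List.enumerate l 0).foldl (fun d p => d.insert p.2 p.1) PySem.Dict.empty

-- Nat-level cut predicate (exactly B's filter condition, after slice/pyRange bridging)
def pvCutB (l : List String) (i : Nat) : Bool :=
  (l.take (i + 1)).all (fun h => !((l.drop (i + 1)).contains h))

def pvCutsTo (l : List String) (i : Nat) : List Nat :=
  (List.range i).filter (pvCutB l)

-- sizes of consecutive cuts, given the previous cut (initially -1)
def pvSizes (p : Int) : List Nat → List Int
  | [] => []
  | c :: cs => ((c : Int) - p) :: pvSizes (c : Int) cs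

def pvLastD (p : Int) (cs : List Nat) : Int :=
  match cs.getLast? with
  | none => p
  | some c => (c : Int)

-- running end value of A after i steps
def pvEnd (l : List String) (i : Nat) : Int :=
  (l.take i).foldl (fun e s => max e ((pvLastDict l).getD s 0)) 0

theorem pvLastDict_append (l : List String) (x s : String) :
    (pvLastDict (l ++ [x])).getD s 0 =
      if s = x then (l.length : Int) else (pvLastDict l).getD s 0 := by
  unfold pvLastDict
  rw [PySem.List.enumerate_append, List.foldl_append]
  simp [PySem.List.enumerate, PySem.Dict.getD_insert]

theorem pvLastDict_spec (l : List String) (s : String) (hs : s ∈ l) :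
    ∃ k : Nat, (pvLastDict l).getD s 0 = (k : Int) ∧ k < l.length ∧ l[k]? = some s ∧
      ∀ m : Nat, m < l.length → l[m]? = some s → m ≤ k := by
  induction l using List.reverseRecOn with
  | nil => simp at hs
  | append_singleton l x ih =>
    rw [pvLastDict_append]
    by_cases hx : s = x
    · refine ⟨l.length, by simp [hx], by simp, ?_, ?_⟩
      · subst hx; simp
      · intro m hm _; simp at hm; omega
    · have hs' : s ∈ l := by
        rcases List.mem_append.mp hs with h | h
        · exact h
        · simp at h; exact absurd h hx
      obtain ⟨k, hk1, hk2, hk3, hk4⟩ := ih hs'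
      refine ⟨k, by simp [hx, hk1], by simp; omega, ?_, ?_⟩
      · rw [List.getElem?_append_left hk2]; exact hk3
      · intro m hm hms
        simp at hm
        by_cases hml : m < l.length
        · exact hk4 m hml (by rwa [List.getElem?_append_left hml] at hms)
        · have : m = l.length := by omega
          subst this
          rw [List.getElem?_append_right (le_refl _)] at hms
          simp at hms
          exact absurd hms.symm hx

-- getD of the element at j: ≥ j, and ≤ i ↔ that species does not reappear after i
theorem pvGetD_ge (l : List String) (j : Nat) (hj : j < l.length) :
    (j : Int) ≤ (pvLastDict l).getD l[j] 0 := by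
  obtain ⟨k, hk1, _, _, hk4⟩ := pvLastDict_spec l l[j] (List.getElem_mem hj)
  have := hk4 j hj (by simp)
  omega

theorem pvGetD_le_iff (l : List String) (j i : Nat) (hj : j < l.length) :
    (pvLastDict l).getD l[j] 0 ≤ (i : Int) ↔ l[j] ∉ l.drop (i + 1) := by
  obtain ⟨k, hk1, hk2, hk3, hk4⟩ := pvLastDict_spec l l[j] (List.getElem_mem hj)
  rw [hk1]
  constructor
  · intro hki hmem
    obtain ⟨m, hm, hml⟩ := List.getElem_of_mem hmem
    rw [List.getElem_drop] at hml
    have hlen : i + 1 + m < l.length := by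
      have := List.length_drop (l := l) (i := i + 1); omega
    have := hk4 (i + 1 + m) hlen (by rw [List.getElem?_eq_getElem hlen, hml])
    omega
  · intro hmem
    by_contra hgt
    rw [Int.not_le] at hgt
    apply hmem
    have hk : i + 1 ≤ k := by omega
    have : l[k] = l[j] := by
      have := hk3; simp [List.getElem?_eq_some_iff] at this
      obtain ⟨_, h⟩ := this; exact h
    rw [← this]
    have : l[k] = (l.drop (i+1))[k - (i+1)]'(by simp; omega) := by
      rw [List.getElem_drop]; congr 1; omega
    rw [this]
    exact List.getElem_mem _

-- upper/lower bound facts for the running max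
theorem pvFoldlMax_le_iff (xs : List String) (f : String → Int) (a c : Int) :
    xs.foldl (fun e s => max e (f s)) a ≤ c ↔ a ≤ c ∧ ∀ s ∈ xs, f s ≤ c := by
  induction xs generalizing a with
  | nil => simp
  | cons x t ih =>
    rw [List.foldl_cons, ih]
    simp only [List.mem_cons, max_le_iff]
    constructor
    · rintro ⟨⟨h1, h2⟩, h3⟩
      refine ⟨h1, fun s hs => ?_⟩
      rcases hs with rfl | hs
      · exact h2
      · exact h3 s hs
    · rintro ⟨h1, h2⟩
      exact ⟨⟨h1, h2 x (Or.inl rfl)⟩, fun s hs => h2 s (Or.inr hs)⟩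

theorem pvEnd_succ (l : List String) (i : Nat) (hi : i < l.length) :
    pvEnd l (i + 1) = max (pvEnd l i) ((pvLastDict l).getD l[i] 0) := by
  unfold pvEnd
  have h : List.take (i + 1) l = List.take i l ++ [l[i]] := by
    rw [List.take_add_one, List.getElem?_eq_getElem hi]
    rfl
  rw [h, List.foldl_append]
  rfl

-- the key characterisation: after updating, end = i iff i is a cut
theorem pvEnd_eq_iff (l : List String) (i : Nat) (hi : i < l.length) :
    (pvEnd l (i + 1) = (i : Int)) = (pvCutB l i = true) := by
  have hge : (i : Int) ≤ pvEnd l (i + 1) := by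
    rw [pvEnd_succ l i hi]
    have := pvGetD_ge l i hi
    omega
  have hle : pvEnd l (i + 1) ≤ (i : Int) ↔ pvCutB l i = true := by
    unfold pvEnd pvCutB
    rw [pvFoldlMax_le_iff]
    simp only [List.all_eq_true, Bool.not_eq_eq_eq_not, Bool.not_true,
      List.contains_eq_mem, decide_eq_false_iff_not]
    constructor
    · rintro ⟨-, h2⟩ s hs
      obtain ⟨j, hj, hjl⟩ := List.getElem_of_mem hs
      have hjlen : j < l.length := by
        have := List.length_take_le (i + 1) l; have := hj
        have : j < l.length := lt_of_lt_of_le hj (by simpa using List.length_take_le (i+1) l)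
        exact this
      rw [List.getElem_take] at hjl
      rw [← hjl]
      rw [← pvGetD_le_iff l j i hjlen]
      exact h2 l[j] (by rw [hjl]; exact hs)
    · intro h
      refine ⟨by positivity, fun s hs => ?_⟩
      obtain ⟨j, hj, hjl⟩ := List.getElem_of_mem hs
      have hjlen : j < l.length := lt_of_lt_of_le hj (by simpa using List.length_take_le (i+1) l)
      rw [List.getElem_take] at hjl
      rw [← hjl, pvGetD_le_iff l j i hjlen, hjl]
      exact h s hs
  simp only [eq_iff_iff]
  constructor
  · intro h; rw [← hle]; omega
  · intro h; have := hle.mpr h; omega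

theorem pvCutsTo_succ (l : List String) (i : Nat) :
    pvCutsTo l (i + 1) = pvCutsTo l i ++ (if pvCutB l i then [i] else []) := by
  unfold pvCutsTo
  rw [List.range_succ, List.filter_append]
  simp [List.filter]
  split <;> simp_all

theorem pvLastD_cons (p : Int) (c : Nat) (cs : List Nat) :
    pvLastD p (c :: cs) = pvLastD (c : Int) cs := by
  cases cs with
  | nil => simp [pvLastD]
  | cons d t =>
    rcases h : (d :: t).getLast? with - | x
    · simp at h
    · simp [pvLastD, List.getLast?_cons_cons, h]

theorem pvSizes_append (p : Int) (cs : List Nat) (c : Nat) :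
    pvSizes p (cs ++ [c]) = pvSizes p cs ++ [(c : Int) - pvLastD p cs] := by
  induction cs generalizing p with
  | nil => simp [pvSizes, pvLastD]
  | cons d t ih =>
    simp only [List.cons_append, pvSizes, ih, pvLastD_cons]

theorem pvLastD_append (p : Int) (cs : List Nat) (c : Nat) :
    pvLastD p (cs ++ [c]) = (c : Int) := by
  simp [pvLastD]

-- main invariant for A's fold
theorem pvInvariant (l : List String) (i : Nat) (hi : i ≤ l.length) :
    ((PySem.List.enumerate l 0).take i).foldl
      (fun (st : List Int × Int × Int) p =>
        let e := max st.2.2 ((pvLastDict l).getD p.2 0)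
        if p.1 == e then (st.1 ++ [p.1 - st.2.1 + 1], (p.1 + 1, e))
        else (st.1, (st.2.1, e)))
      ([], (0, 0)) =
    (pvSizes (-1) (pvCutsTo l i), (pvLastD (-1) (pvCutsTo l i) + 1, pvEnd l i)) := by
  induction i with
  | zero => simp [pvCutsTo, pvSizes, pvLastD, pvEnd]
  | succ i ih =>
    have hi' : i < l.length := by omega
    have htake : (PySem.List.enumerate l 0).take (i + 1) =
        (PySem.List.enumerate l 0).take i ++ [((i : Int), l[i])] := by
      rw [List.take_succ]
      congr 1
      rw [List.getElem?_eq_getElem (by rw [PySem.List.length_enumerate]; exact hi')]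
      rw [PySem.List.getElem_enumerate]
      simp
    rw [htake, List.foldl_append, ih (by omega)]
    simp only [List.foldl_cons, List.foldl_nil]
    have hend : max (pvEnd l i) ((pvLastDict l).getD l[i] 0) = pvEnd l (i + 1) :=
      (pvEnd_succ l i hi').symm
    simp only [hend]
    rw [pvCutsTo_succ]
    by_cases hcut : pvCutB l i
    · have hcv : pvEnd l (i + 1) = (i : Int) := by
        have h := pvEnd_eq_iff l i hi'
        rw [h]; exact hcut
      have hc : ((i : Int) == pvEnd l (i + 1)) = true := by
        simp [hcv]
      simp only [hcut, if_true, hc, if_true]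
      rw [pvSizes_append, pvLastD_append]
      have harith : (i : Int) - (pvLastD (-1) (pvCutsTo l i) + 1) + 1 =
          (i : Int) - pvLastD (-1) (pvCutsTo l i) := by ring
      rw [harith, hcv]
    · have hne : pvEnd l (i + 1) ≠ (i : Int) := by
        intro h
        have heq := pvEnd_eq_iff l i hi'
        exact absurd (heq ▸ h) (by simpa using hcut)
      have hnc : ((i : Int) == pvEnd l (i + 1)) = false := by
        simp only [beq_eq_false_iff_ne, ne_eq]
        exact fun h => hne h.symm
      simp [hcut, hnc]

-- B equals the sizes of the cut list
theorem pvZip_eq_sizes (cs : List Nat) (p : Int) :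
    (List.zip (p :: cs.map (Nat.cast : Nat → Int)) (cs.map (Nat.cast : Nat → Int))).map
      (fun pc => pc.2 - pc.1) = pvSizes p cs := by
  induction cs generalizing p with
  | nil => simp [pvSizes]
  | cons c t ih => simp [pvSizes, ih]

theorem pvAlt_eq (l : List String) :
    group_animals_by_habitat_alt l = pvSizes (-1) (pvCutsTo l l.length) := by
  have hrange : PySem.List.pyRange 0 (l.length : Int) 1 =
      (List.range l.length).map (Nat.cast : Nat → Int) := by
    rw [PySem.List.pyRange_one]
    simp
  have hfilter : (PySem.List.pyRange 0 (l.length : Int) 1).filter (fun i =>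
      PySem.Set.isdisjoint
        (PySem.Set.ofList (PySem.List.slice l none (some (i + 1))))
        (PySem.Set.ofList (PySem.List.slice l (some (i + 1)) none))) =
      (pvCutsTo l l.length).map (Nat.cast : Nat → Int) := by
    rw [hrange, List.filter_map]
    unfold pvCutsTo
    congr 1
    apply List.filter_congr
    intro j hj
    simp only [Function.comp_apply]
    have h1 : (j : Int) + 1 = ((j + 1 : Nat) : Int) := by push_cast; ring
    rw [h1, PySem.List.slice_to_natCast, PySem.List.slice_from_natCast]
    have hiff : (PySem.Set.isdisjoint (PySem.Set.ofList (l.take (j + 1)))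
        (PySem.Set.ofList (l.drop (j + 1))) = true) ↔ (pvCutB l j = true) := by
      rw [PySem.Set.isdisjoint_iff]
      unfold pvCutB
      simp [PySem.Set.mem_ofList, List.all_eq_true]
    rcases hb : pvCutB l j
    · rcases hd : PySem.Set.isdisjoint (PySem.Set.ofList (l.take (j + 1)))
        (PySem.Set.ofList (l.drop (j + 1)))
      · rfl
      · rw [hb] at hiff; rw [hd] at hiff; simpa using hiff
    · rw [hiff.mpr hb]
  show (List.zip ((-1) :: (PySem.List.pyRange 0 (l.length : Int) 1).filter (fun i =>
      PySem.Set.isdisjoint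
        (PySem.Set.ofList (PySem.List.slice l none (some (i + 1))))
        (PySem.Set.ofList (PySem.List.slice l (some (i + 1)) none))))
      ((PySem.List.pyRange 0 (l.length : Int) 1).filter (fun i =>
      PySem.Set.isdisjoint
        (PySem.Set.ofList (PySem.List.slice l none (some (i + 1))))
        (PySem.Set.ofList (PySem.List.slice l (some (i + 1)) none))))).map
      (fun pc => pc.2 - pc.1) = pvSizes (-1) (pvCutsTo l l.length)
  rw [hfilter]
  exact pvZip_eq_sizes (pvCutsTo l l.length) (-1)

theorem pvA_eq (l : List String) :
    group_animals_by_habitat l = pvSizes (-1) (pvCutsTo l l.length) := by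
  have h := pvInvariant l l.length (le_refl _)
  rw [List.take_of_length_le (by rw [PySem.List.length_enumerate])] at h
  show ((PySem.List.enumerate l 0).foldl
      (fun (st : List Int × Int × Int) p =>
        let e := max st.2.2 ((pvLastDict l).getD p.2 0)
        if p.1 == e then (st.1 ++ [p.1 - st.2.1 + 1], (p.1 + 1, e))
        else (st.1, (st.2.1, e)))
      ([], (0, 0))).1 = pvSizes (-1) (pvCutsTo l l.length)
  rw [h]

-- ===== VERDICT (by name: the statement is the Claim_ definition above) =====
theorem group_animals_by_habitat_spec : Claim_equal_group_animals_by_habitat := by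
  intro habitats _
  unfold Spec_group_animals_by_habitat
  rw [pvA_eq, pvAlt_eq]
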